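-- pv_equiv track=rewrite | github.com/kul-group/MAZE-sim | scraps/forcefield.py | _get_index_dict
-- ===== SOURCE A (Python) =====
-- from itertools import permutations
--
-- def _get_index_dict(type_dict, whole_type_list, index_list):
--     """ assign bond pairs or angles indices into different bond or angle types, all the pairs or angles within the same
--     types will share the same set of force field parameters.
--     :param type_dict:
--     :param whole_type_list:
--     :param index_list:
--     :return index_dict: return a dictionary of all bond-pairs or angle indices for each unique bond or angle type,
--     using the the same keys as type_dict.
--     """
--     index_dict = {}
--     for key, value in type_dict.items():
--         temp_list = []
--         for count, items in enumerate(whole_type_list):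
--             if any(list(pair) == value for pair in list(permutations(items))):
--                 temp_list.append(index_list[count])
--         index_dict[key] = temp_list
--
--     return index_dict
-- ===== SOURCE B (Python) =====
-- def _get_index_dict(type_dict, whole_type_list, index_list):
--     """Group indices by sorted-tuple key built in one pass, then one lookup per type."""
--     lookup = {}
--     for index, items in zip(index_list, whole_type_list):
--         lookup.setdefault(tuple(sorted(items)), []).append(index)
--     return {key: lookup.get(tuple(sorted(value)), [])
--             for key, value in type_dict.items()}
-- ===== Notes on version B (the rewrite author's own statement) =====
-- stated objective: faster
-- what changed: Instead of testing every entry of whole_type_list against every type by generating all k! permutations, B makes one pass over zip(index_list, whole_type_list) grouping indices in a dict keyed by the sorted tuple of each entry, then answers each type with a single sorted-key lookup.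
import Mathlib
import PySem

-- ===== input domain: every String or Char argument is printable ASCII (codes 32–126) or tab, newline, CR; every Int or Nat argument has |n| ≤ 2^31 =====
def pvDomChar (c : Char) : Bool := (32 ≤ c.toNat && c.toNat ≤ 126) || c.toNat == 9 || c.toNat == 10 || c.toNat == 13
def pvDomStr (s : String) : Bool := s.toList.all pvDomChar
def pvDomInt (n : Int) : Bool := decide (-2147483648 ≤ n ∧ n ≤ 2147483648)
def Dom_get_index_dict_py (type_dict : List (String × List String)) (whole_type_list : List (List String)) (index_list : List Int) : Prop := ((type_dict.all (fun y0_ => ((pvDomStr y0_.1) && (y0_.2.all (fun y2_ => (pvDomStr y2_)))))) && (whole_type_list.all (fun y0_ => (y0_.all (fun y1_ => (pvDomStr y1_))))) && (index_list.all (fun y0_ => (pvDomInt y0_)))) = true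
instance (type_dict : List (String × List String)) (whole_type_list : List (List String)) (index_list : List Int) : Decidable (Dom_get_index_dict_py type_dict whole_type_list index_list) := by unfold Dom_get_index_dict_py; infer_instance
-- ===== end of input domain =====

-- B replaces A's per-type scan with k! permutation tests by a one-pass grouping dict keyed by the
-- sorted item list, then one lookup per type (asymptotically faster; return-value equivalence only).

-- ===== PORT A =====
-- itertools.permutations(items) is PySem.List.permutations items items.length;
-- index_list[count] (count ≥ 0) is pyGetD, in range under Pre_.
def get_index_dict_py (type_dict : List (String × List String)) (whole_type_list : List (List String)) (index_list : List Int) : List (String × List Int) :=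
  (type_dict.foldl (fun (index_dict : PySem.Dict String (List Int)) kv =>
      let temp_list := (PySem.List.enumerate whole_type_list 0).foldl
        (fun acc ci =>
          if (PySem.List.permutations ci.2 ci.2.length).any (fun pair => pair == kv.2)
          then acc ++ [PySem.List.pyGetD index_list ci.1 0] else acc) []
      index_dict.insert kv.1 temp_list) PySem.Dict.empty).items

-- ===== PORT B =====
-- lookup.setdefault(tuple(sorted(items)), []).append(index) is Dict.modify key [] (· ++ [index]).
def get_index_dict_py_alt (type_dict : List (String × List String)) (whole_type_list : List (List String)) (index_list : List Int) : List (String × List Int) :=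
  let lookup := (index_list.zip whole_type_list).foldl
    (fun (d : PySem.Dict (List String) (List Int)) p =>
      d.modify (PySem.List.sorted p.2 (fun x => x) false) [] (fun l => l ++ [p.1])) PySem.Dict.empty
  (type_dict.foldl (fun (r : PySem.Dict String (List Int)) kv =>
      r.insert kv.1 (lookup.getD (PySem.List.sorted kv.2 (fun x => x) false) [])) PySem.Dict.empty).items

-- ===== PRECONDITION & SPEC =====
-- Pre_ excludes exactly the inputs where A raises IndexError: some entry of whole_type_list at a
-- position ≥ len(index_list) is a permutation of some type's value, so A evaluates index_list[count]
-- out of range.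
def Pre_get_index_dict_py (type_dict : List (String × List String)) (whole_type_list : List (List String)) (index_list : List Int) : Prop :=
  ∀ i : ℕ, i < whole_type_list.length →
    (∃ kv ∈ type_dict, (whole_type_list.getD i []).Perm kv.2) → i < index_list.length
instance (type_dict : List (String × List String)) (whole_type_list : List (List String)) (index_list : List Int) : Decidable (Pre_get_index_dict_py type_dict whole_type_list index_list) := by unfold Pre_get_index_dict_py; infer_instance
def pvWitness_get_index_dict_py : (List (String × List String)) × List (List String) × List Int :=
  ([("t", ["a", "b"])], [["b", "a"]], [7])

def Spec_get_index_dict_py (type_dict : List (String × List String)) (whole_type_list : List (List String)) (index_list : List Int) (out : List (String × List Int)) : Prop := out = get_index_dict_py_alt type_dict whole_type_list index_list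
instance (type_dict : List (String × List String)) (whole_type_list : List (List String)) (index_list : List Int) (out : List (String × List Int)) : Decidable (Spec_get_index_dict_py type_dict whole_type_list index_list out) := by unfold Spec_get_index_dict_py; infer_instance

-- ===== CLAIM (what is proved, stated in full; the proofs are below) =====
def Claim_equal_get_index_dict_py : Prop := ∀ (type_dict : List (String × List String)) (whole_type_list : List (List String)) (index_list : List Int), Dom_get_index_dict_py type_dict whole_type_list index_list → Pre_get_index_dict_py type_dict whole_type_list index_list → Spec_get_index_dict_py type_dict whole_type_list index_list (get_index_dict_py type_dict whole_type_list index_list)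
-- ===== LEMMAS AND PROOFS =====

-- converse of PySem.List.perm_of_mem_permutations
theorem pv_mem_permutations_of_perm {α : Type} [DecidableEq α] :
    ∀ (n : ℕ) (xs p : List α), xs.length = n → p.Perm xs →
      p ∈ PySem.List.permutations xs n := by
  intro n
  induction n with
  | zero =>
    intro xs p hl hp
    have hx : xs = [] := List.eq_nil_of_length_eq_zero hl
    subst hx
    have hp' : p = [] := List.Perm.eq_nil hp
    simp [hp', PySem.List.permutations_zero]
  | succ n ih =>
    intro xs p hl hp
    have hpl : p.length = n + 1 := by rw [hp.length_eq, hl]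
    obtain ⟨h, t, rfl⟩ : ∃ h t, p = h :: t := by
      cases p with
      | nil => simp at hpl
      | cons a b => exact ⟨a, b, rfl⟩
    have hmem : h ∈ xs := hp.subset List.mem_cons_self
    have ht : t.Perm (xs.erase h) := (List.cons_perm_iff_perm_erase.mp hp).2
    have hi : xs.idxOf h < xs.length := List.idxOf_lt_length_of_mem hmem
    have hxi : xs[xs.idxOf h] = h := List.getElem_idxOf hi
    have herase : xs.eraseIdx (xs.idxOf h) = xs.erase h := List.eraseIdx_idxOf_eq_erase h xs
    have hlen : (xs.eraseIdx (xs.idxOf h)).length = n := by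
      rw [List.length_eraseIdx_of_lt hi, hl]
      omega
    have htmem : t ∈ PySem.List.permutations (xs.eraseIdx (xs.idxOf h)) n := by
      apply ih _ _ hlen
      rw [herase]; exact ht
    simp only [PySem.List.permutations]
    refine List.mem_flatMap.mpr ⟨xs.idxOf h, List.mem_range.mpr hi, ?_⟩
    rw [List.getElem?_eq_getElem hi, hxi]
    exact List.mem_map.mpr ⟨t, htmem, rfl⟩

-- A's inner test 'any(list(pair) == value for pair in permutations(items))' decides items ~ value
theorem pv_any_perm_eq (items value : List String) :
    ((PySem.List.permutations items items.length).any (fun pair => pair == value))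
      = decide (items.Perm value) := by
  by_cases h : items.Perm value
  · simp only [h, decide_true]
    exact List.any_eq_true.mpr ⟨value, pv_mem_permutations_of_perm items.length items value rfl h.symm, by simp⟩
  · simp only [h, decide_false]
    refine List.any_eq_false.mpr ?_
    intro p hp
    simp only [beq_iff_eq]
    rintro rfl
    exact h (PySem.List.perm_of_mem_permutations hp).symm
-- B's key test 'sorted(items) == sorted(value)' decides the same relation
theorem pv_sorted_beq_eq (items value : List String) :
    (PySem.List.sorted items (fun x => x) false == PySem.List.sorted value (fun x => x) false)
      = decide (items.Perm value) := by
  by_cases h : items.Perm value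
  · simp [PySem.List.sorted_id_eq_sorted_id_iff_perm, h]
  · simp [beq_iff_eq, PySem.List.sorted_id_eq_sorted_id_iff_perm, h]

-- core list lemma: A's filtered enumerate scan equals B's zip-group, bucket by bucket
theorem pv_scan_eq (value : List String) :
    ∀ (wtl : List (List String)) (il : List Int) (s : ℕ),
      (∀ i (_ : i < wtl.length), wtl[i].Perm value → s + i < il.length) →
      ((PySem.List.enumerate wtl (s : Int)).filter
          (fun ci => (PySem.List.permutations ci.2 ci.2.length).any (fun pair => pair == value))).map
          (fun ci => PySem.List.pyGetD il ci.1 0)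
        = (((il.drop s).zip wtl).filter
            (fun p => PySem.List.sorted p.2 (fun x => x) false == PySem.List.sorted value (fun x => x) false)).map
            (fun p => p.1) := by
  intro wtl
  induction wtl with
  | nil => intro il s _; simp [PySem.List.enumerate_nil]
  | cons x rest ih =>
    intro il s hpre
    by_cases hs : s < il.length
    · have hdrop : il.drop s = il[s] :: il.drop (s + 1) := (List.getElem_cons_drop hs).symm
      rw [PySem.List.enumerate_cons, hdrop, List.zip_cons_cons]
      simp only [List.filter_cons]
      have htail : ((PySem.List.enumerate rest ((s : Int) + 1)).filter
            (fun ci => (PySem.List.permutations ci.2 ci.2.length).any (fun pair => pair == value))).map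
            (fun ci => PySem.List.pyGetD il ci.1 0)
          = (((il.drop (s + 1)).zip rest).filter
              (fun p => PySem.List.sorted p.2 (fun x => x) false == PySem.List.sorted value (fun x => x) false)).map
              (fun p => p.1) := by
        have hcast : ((s : Int) + 1) = ((s + 1 : ℕ) : Int) := by push_cast; ring
        rw [hcast]
        apply ih
        intro i hi hp
        have := hpre (i + 1) (by simpa using Nat.succ_lt_succ hi) (by simpa using hp)
        omega
      rw [pv_any_perm_eq x value, pv_sorted_beq_eq x value]
      by_cases hc : x.Perm value
      · rw [if_pos (by simp [hc]), if_pos (by simp [hc])]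
        simp only [List.map_cons]
        rw [htail]
        congr 1
        show PySem.List.pyGetD il ((s : ℕ) : Int) 0 = il[s]
        rw [PySem.List.pyGetD_natCast]
        exact List.getD_eq_getElem il 0 hs
      · rw [if_neg (by simp [hc]), if_neg (by simp [hc])]
        exact htail
    · have hdrop : il.drop s = [] := List.drop_eq_nil_of_le (by omega)
      rw [hdrop, List.zip_nil_left, List.filter_nil, List.map_nil]
      have hnone : ∀ ci ∈ PySem.List.enumerate (x :: rest) (s : Int),
          ¬ ((PySem.List.permutations ci.2 ci.2.length).any (fun pair => pair == value)) = true := by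
        intro ci hci
        rw [PySem.List.mem_enumerate_iff] at hci
        obtain ⟨k, hk, rfl⟩ := hci
        rw [pv_any_perm_eq]
        simp only [decide_eq_true_eq]
        intro hp
        have := hpre k hk hp
        omega
      rw [List.filter_eq_nil_iff.mpr hnone, List.map_nil]

-- per-type bucket equality: A's temp_list equals B's lookup value
theorem pv_bucket_eq (value : List String) (wtl : List (List String)) (il : List Int)
    (hpre : ∀ i (_ : i < wtl.length), wtl[i].Perm value → i < il.length) :
    (PySem.List.enumerate wtl 0).foldl
        (fun acc ci =>
          if (PySem.List.permutations ci.2 ci.2.length).any (fun pair => pair == value)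
          then acc ++ [PySem.List.pyGetD il ci.1 0] else acc) []
      = ((il.zip wtl).foldl
          (fun (d : PySem.Dict (List String) (List Int)) p =>
            d.modify (PySem.List.sorted p.2 (fun x => x) false) [] (fun l => l ++ [p.1]))
          PySem.Dict.empty).getD (PySem.List.sorted value (fun x => x) false) [] := by
  rw [PySem.List.foldl_append_if, List.nil_append]
  have hfold : (il.zip wtl).foldl
      (fun (d : PySem.Dict (List String) (List Int)) p =>
        d.modify (PySem.List.sorted p.2 (fun x => x) false) [] (fun l => l ++ [p.1]))
      PySem.Dict.empty
    = ((il.zip wtl).map (fun p => (PySem.List.sorted p.2 (fun x => x) false, p.1))).foldl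
        (fun (d : PySem.Dict (List String) (List Int)) q => d.modify q.1 [] (fun l => l ++ [q.2]))
        PySem.Dict.empty := by
    rw [List.foldl_map]
  rw [hfold, PySem.Dict.getD_foldl_modify_append, PySem.Dict.getD_empty, List.nil_append,
    List.filter_map, List.map_map]
  have := pv_scan_eq value wtl il 0 (by simpa using hpre)
  simpa using this

-- pointwise-on-members foldl congruence
theorem pv_foldl_congr {a b : Type} (l : List a) (f g : b -> a -> b)
    (h : forall (acc : b), forall x, x ∈ l -> f acc x = g acc x) :
    forall (acc : b), l.foldl f acc = l.foldl g acc := by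
  induction l with
  | nil => intro acc; rfl
  | cons x t ih =>
    intro acc
    rw [List.foldl_cons, List.foldl_cons, h acc x List.mem_cons_self]
    exact ih (fun acc y hy => h acc y (List.mem_cons_of_mem _ hy)) _

-- ===== VERDICT (by name: the statement is the Claim_ definition above) =====
theorem get_index_dict_py_spec : Claim_equal_get_index_dict_py := by
  unfold Claim_equal_get_index_dict_py
  intro td wtl il _ hpre
  unfold Spec_get_index_dict_py
  simp only [get_index_dict_py, get_index_dict_py_alt]
  refine congrArg PySem.Dict.items (pv_foldl_congr td _ _ ?_ PySem.Dict.empty)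
  intro d kv hkv
  refine congrArg (d.insert kv.1) (pv_bucket_eq kv.2 wtl il ?_)
  intro i hi hp
  refine hpre i hi ⟨kv, hkv, ?_⟩
  rw [List.getD_eq_getElem wtl [] hi]
  exact hp
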